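-- pv_equiv track=rewrite | github.com/pydxflwb/Sniffer | src/MainWindow.py | SearchLength
-- ===== SOURCE A (Python) =====
-- def SearchLength(information):
--     flag = True
--     length = 0
--     i = 1
--     n = 0
--     while(flag and i <= len(information)):
--         if information[-i] in '0123456789':
--             length = length + (10 ** n) * int(information[-i])
--             n += 1
--         else:
--             if length != 0:
--                 flag = False
--         i += 1
--     return length
-- ===== SOURCE B (Python) =====
-- import re
--
-- def SearchLength(information):
--     m = re.search(r'([0-9]+)[^0-9]*$', information)
--     return int(m.group(1)) if m else 0
-- ===== Notes on version B (the rewrite author's own statement) =====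
-- stated objective: idiomatic
-- what changed: Replaces A's backward character-by-character scan with flag/length/10**n accumulation by a single re.search for the last maximal ASCII digit run, pattern ([0-9]+)[^0-9]*$, returning int() of the captured group and 0 when there is no match.
-- intended difference: On strings whose last maximal digit run consists only of zeros while a nonzero digit occurs earlier, A keeps scanning past the intervening non-digits and glues earlier digit runs into one number (e.g. for the input port 8 id 0 it returns 80), because its stop test only fires once the accumulated value is nonzero; B returns the value of the last digit run itself (0 there), which is the intended trailing number. — e.g. on SearchLength("1a0"): A returns 10, B returns 0
import Mathlib
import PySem

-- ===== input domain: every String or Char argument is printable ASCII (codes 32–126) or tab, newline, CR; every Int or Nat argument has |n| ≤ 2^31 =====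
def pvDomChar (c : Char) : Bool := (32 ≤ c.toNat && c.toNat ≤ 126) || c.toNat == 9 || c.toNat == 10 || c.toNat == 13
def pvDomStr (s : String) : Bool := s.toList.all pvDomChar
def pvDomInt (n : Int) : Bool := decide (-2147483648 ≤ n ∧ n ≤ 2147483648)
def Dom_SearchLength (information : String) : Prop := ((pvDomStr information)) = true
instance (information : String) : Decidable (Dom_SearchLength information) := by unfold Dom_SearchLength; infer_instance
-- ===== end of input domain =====

-- B replaces A's backward scan with flag/length/10**n accumulation by one regex
-- lookup for the last maximal ASCII digit run; B fixes A's gluing of digit runs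
-- across non-digits when the trailing run is all zeros (stated in D_SearchLength).


-- ===== PORT A =====
-- `information[-i] in '0123456789'`
def pvIsD (c : Char) : Bool := c ∈ ['0','1','2','3','4','5','6','7','8','9']
-- `int(information[-i])` for a single digit character (exact when pvIsD c)
def pvDigitVal (c : Char) : Int := (c.toNat : Int) - 48
-- A's `while(flag and i <= len(information))` reading information[-i] for i = 1..len
-- is exactly a traversal of the reversed character list; `flag = False` ends the loop
-- with no further state change, hence is an early return of `length`.
def pvALoop : List Char → Int → Nat → Int
  | [], length, _ => length
  | c :: rest, length, n =>
    if pvIsD c then pvALoop rest (length + 10 ^ n * pvDigitVal c) (n + 1)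
    else if length ≠ 0 then length
    else pvALoop rest length n

def SearchLength (information : String) : Int :=
  pvALoop information.toList.reverse 0 0

-- ===== PORT B =====
-- int() of the captured group: the run is held in reversed order, so the fold
-- rebuilds the decimal value with the last character as units digit.
def pvRunVal : List Char → Int
  | [] => 0
  | c :: t => pvRunVal t * 10 + pvDigitVal c
-- re.search(r'([0-9]+)[^0-9]*$', s) ported by hand (exact on every string): the
-- match skips the trailing non-digits and captures the last maximal ASCII digit
-- run; no match (no digit run) yields 0.
def SearchLength_alt (information : String) : Int :=
  pvRunVal (((information.toList.reverse).dropWhile (fun c => ! pvIsD c)).takeWhile (fun c => pvIsD c))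

-- ===== PRECONDITION & SPEC =====
-- On strings whose last maximal digit run consists only of zeros while a nonzero digit
-- occurs earlier, A keeps scanning past the intervening non-digits and glues earlier
-- digit runs into one number (for the input  port 8 id 0  it returns 80), because its
-- stop test only fires once the accumulated value is nonzero; B returns the value of
-- the last digit run itself (0 there), which is the intended trailing number.
-- Closed form (over the reversed character list r): the first nonzero digit of r exists
-- at position k, and a non-digit lies between the first digit of r and position k.
def D_SearchLength (information : String) : Prop :=
  let r := information.toList.reverse
  let k := r.findIdx (fun c => pvIsD c && c != '0')
  k < r.length ∧ ((r.take k).drop (r.findIdx pvIsD)).any (fun c => ! pvIsD c) = true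
instance (information : String) : Decidable (D_SearchLength information) := by unfold D_SearchLength; infer_instance

def Spec_SearchLength (information : String) (out : Int) : Prop := ¬ D_SearchLength information → out = SearchLength_alt information
instance (information : String) (out : Int) : Decidable (Spec_SearchLength information out) := by unfold Spec_SearchLength; infer_instance

def pvDiffWitness_SearchLength : String := "1a0"
def pvDiffWitnessOut_SearchLength : Int × Int := (10, 0)

-- ===== CLAIM (what is proved, stated in full; the proofs are below) =====
def Claim_unchanged_SearchLength : Prop := ∀ (information : String), Dom_SearchLength information → Spec_SearchLength information (SearchLength information)
def Claim_changed_SearchLength : Prop := Dom_SearchLength (pvDiffWitness_SearchLength) ∧ D_SearchLength (pvDiffWitness_SearchLength) ∧ SearchLength (pvDiffWitness_SearchLength) = pvDiffWitnessOut_SearchLength.1 ∧ SearchLength_alt (pvDiffWitness_SearchLength) = pvDiffWitnessOut_SearchLength.2 ∧ pvDiffWitnessOut_SearchLength.1 ≠ pvDiffWitnessOut_SearchLength.2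
def Claim_exact_SearchLength : Prop := ∀ (information : String), Dom_SearchLength information → D_SearchLength information → SearchLength information ≠ SearchLength_alt information

-- ===== LEMMAS AND PROOFS =====

-- per-character facts about digit characters
theorem pvDigit_facts {c : Char} (h : pvIsD c = true) :
    0 ≤ pvDigitVal c ∧ pvDigitVal c ≤ 9 ∧ (pvDigitVal c = 0 ↔ c = '0') := by
  simp [pvIsD] at h
  rcases h with h|h|h|h|h|h|h|h|h|h <;> subst h <;> decide

-- skipping leading non-digits while length = 0
theorem pvALoop_skip (r : List Char) (n : Nat) :
    pvALoop r 0 n = pvALoop (r.dropWhile (fun c => ! pvIsD c)) 0 n := by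
  induction r with
  | nil => rfl
  | cons c t ih =>
    by_cases h : pvIsD c = true
    · simp [List.dropWhile, h]
    · simp only [Bool.not_eq_true] at h
      simp [pvALoop, List.dropWhile, h, ih]

-- consuming a run of digits accumulates its value at weight 10^n
theorem pvALoop_run (run : List Char) (rest : List Char) (L : Int) (n : Nat)
    (h : ∀ c ∈ run, pvIsD c = true) :
    pvALoop (run ++ rest) L n = pvALoop rest (L + 10 ^ n * pvRunVal run) (n + run.length) := by
  induction run generalizing L n with
  | nil => simp [pvRunVal]
  | cons c t ih =>
    have hc : pvIsD c = true := h c (by simp)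
    have ht : ∀ x ∈ t, pvIsD x = true := fun x hx => h x (by simp [hx])
    simp only [List.cons_append, pvALoop, hc, if_pos]
    rw [ih _ _ ht]
    have : L + 10 ^ n * pvDigitVal c + 10 ^ (n + 1) * pvRunVal t
         = L + 10 ^ n * pvRunVal (c :: t) := by
      simp [pvRunVal, pow_succ]; ring
    rw [this]
    congr 1
    simp only [List.length_cons]
    omega

-- value of a digit run: nonnegative, and zero exactly when all characters are '0'
theorem pvRunVal_facts (run : List Char) (h : ∀ c ∈ run, pvIsD c = true) :
    0 ≤ pvRunVal run ∧ (pvRunVal run = 0 ↔ ∀ c ∈ run, c = '0') := by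
  induction run with
  | nil => simp [pvRunVal]
  | cons c t ih =>
    have hc := pvDigit_facts (h c (by simp))
    have ht := ih (fun x hx => h x (by simp [hx]))
    have hz : pvDigitVal '0' = 0 := by decide
    constructor
    · simp only [pvRunVal]; nlinarith [ht.1, hc.1]
    · constructor
      · intro h0 x hx
        have h1 : pvRunVal t = 0 ∧ pvDigitVal c = 0 := by
          simp only [pvRunVal] at h0; constructor <;> nlinarith [ht.1, hc.1, hc.2.1]
        rcases List.mem_cons.mp hx with hx | hx
        · subst hx; exact hc.2.2.mp h1.2
        · exact (ht.2.mp h1.1) x hx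
      · intro hall
        have hc0 : c = '0' := hall c (by simp)
        have ht0 : pvRunVal t = 0 := ht.2.mpr (fun x hx => hall x (by simp [hx]))
        simp [pvRunVal, ht0, hc0, hz]

-- if every digit in l is '0', the loop started at length 0 returns 0
theorem pvALoop_zeros (l : List Char) (n : Nat)
    (h : ∀ c ∈ l, pvIsD c = true → c = '0') : pvALoop l 0 n = 0 := by
  induction l generalizing n with
  | nil => rfl
  | cons c t ih =>
    have ht : ∀ x ∈ t, pvIsD x = true → x = '0' := fun x hx => h x (by simp [hx])
    by_cases hc : pvIsD c = true
    · have hc0 : c = '0' := h c (by simp) hc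
      subst hc0
      have h0 : pvDigitVal '0' = 0 := by decide
      simp only [pvALoop, hc, if_true, h0, mul_zero, add_zero]
      exact ih _ ht
    · simp only [Bool.not_eq_true] at hc
      simp only [pvALoop, hc, Bool.false_eq_true, ne_eq, not_true_eq_false,
        not_false_eq_true, if_neg]
      exact ih _ ht

-- a positive length is never lost
theorem pvALoop_pos_preserve (l : List Char) (L : Int) (n : Nat) (hL : 0 < L) :
    0 < pvALoop l L n := by
  induction l generalizing L n with
  | nil => exact hL
  | cons c t ih =>
    by_cases hc : pvIsD c = true
    · have hv := (pvDigit_facts hc).1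
      have : 0 < L + 10 ^ n * pvDigitVal c := by positivity
      simp only [pvALoop, hc, if_pos]
      exact ih _ _ this
    · simp only [Bool.not_eq_true] at hc
      have : L ≠ 0 := ne_of_gt hL
      simp [pvALoop, hc, this, hL]

-- a nonzero digit somewhere ahead makes the loop return a positive value
theorem pvALoop_pos (l : List Char) (n : Nat)
    (h : ∃ c ∈ l, pvIsD c = true ∧ c ≠ '0') : 0 < pvALoop l 0 n := by
  induction l generalizing n with
  | nil => simp at h
  | cons c t ih =>
    by_cases hc : pvIsD c = true
    · by_cases hc0 : c = '0'
      · subst hc0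
        have hw : ∃ x ∈ t, pvIsD x = true ∧ x ≠ '0' := by
          rcases h with ⟨x, hx, hxd, hxne⟩
          rcases List.mem_cons.mp hx with hx | hx
          · exact absurd hx hxne
          · exact ⟨x, hx, hxd, hxne⟩
        have hc : pvIsD '0' = true := by decide
        have h0 : pvDigitVal '0' = 0 := by decide
        simp only [pvALoop, hc, if_true, h0, mul_zero, add_zero]
        exact ih _ hw
      · have hf := pvDigit_facts hc
        have hv1 : 0 < pvDigitVal c := by
          rcases lt_or_eq_of_le hf.1 with h1 | h1
          · exact h1
          · exact absurd (hf.2.2.mp h1.symm) hc0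
        simp only [pvALoop, hc, if_pos]
        apply pvALoop_pos_preserve
        positivity
    · simp only [Bool.not_eq_true] at hc
      have hw : ∃ x ∈ t, pvIsD x = true ∧ x ≠ '0' := by
        rcases h with ⟨x, hx, hxd, hxne⟩
        rcases List.mem_cons.mp hx with hx | hx
        · subst hx; simp [hc] at hxd
        · exact ⟨x, hx, hxd, hxne⟩
      simp [pvALoop, hc, ih _ hw]

-- decomposition of A's run through the reversed string
theorem pvA_decomp (s : String) :
    SearchLength s
      = pvALoop (((s.toList.reverse).dropWhile (fun c => ! pvIsD c)).dropWhile (fun c => pvIsD c))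
          (pvRunVal (((s.toList.reverse).dropWhile (fun c => ! pvIsD c)).takeWhile (fun c => pvIsD c)))
          ((((s.toList.reverse).dropWhile (fun c => ! pvIsD c)).takeWhile (fun c => pvIsD c)).length)
      ∨ (((s.toList.reverse).dropWhile (fun c => ! pvIsD c)) = []) := by
  -- actually the first disjunct always holds
  left
  set r2 := (s.toList.reverse).dropWhile (fun c => ! pvIsD c) with hr2
  have h1 : SearchLength s = pvALoop r2 0 0 := by
    unfold SearchLength
    exact pvALoop_skip _ 0
  have hsplit : r2 = r2.takeWhile (fun c => pvIsD c) ++ r2.dropWhile (fun c => pvIsD c) :=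
    (List.takeWhile_append_dropWhile).symm
  have hall : ∀ c ∈ r2.takeWhile (fun c => pvIsD c), pvIsD c = true := by
    intro c hc
    exact List.mem_takeWhile_imp hc
  rw [h1, hsplit, pvALoop_run _ _ _ _ hall]
  simp

-- the head of (dropWhile p l) fails p
theorem dropWhile_head_false {p : Char → Bool} {l : List Char} {c : Char} {t : List Char}
    (h : l.dropWhile p = c :: t) : p c = false := by
  have := List.head?_dropWhile_not p l
  rw [h] at this
  simpa using this

-- findIdx finds a hit inside the list exactly when one exists
theorem pv_findIdx_lt (p : Char → Bool) (l : List Char) :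
    l.findIdx p < l.length ↔ ∃ x ∈ l, p x = true := by
  induction l with
  | nil => simp
  | cons a t ih =>
    rw [List.findIdx_cons]
    by_cases ha : p a = true
    · simp [ha]
    · have ha' : p a = false := by simpa using ha
      simp [ha', ih]

-- scanning inside the digit run: a non-digit before the first nonzero digit
-- means the run is all zeros and the nonzero digit lies beyond it
theorem pv_phase2 (t : List Char) :
    (t.findIdx (fun c => pvIsD c && c != '0') < t.length ∧
     ((t.take (t.findIdx (fun c => pvIsD c && c != '0'))).any (fun c => ! pvIsD c)) = true) ↔
    ((∀ c ∈ t.takeWhile (fun c => pvIsD c), c = '0') ∧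
     (∃ c ∈ t.dropWhile (fun c => pvIsD c), pvIsD c = true ∧ c ≠ '0')) := by
  induction t with
  | nil => simp
  | cons c t' ih =>
    rw [List.findIdx_cons]
    by_cases hcd : pvIsD c = true
    · by_cases hc0 : c = '0'
      · subst hc0
        have hp : (pvIsD '0' && '0' != '0') = false := by decide
        rw [hp]
        simp only [cond_false]
        constructor
        · rintro ⟨h1, h2⟩
          rw [List.take_succ_cons, List.any_cons] at h2
          simp only [hcd, Bool.not_true, Bool.false_or] at h2
          have := ih.mp ⟨by simpa using h1, h2⟩
          refine ⟨?_, ?_⟩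
          · intro x hx
            rw [List.takeWhile_cons] at hx
            simp only [hcd, if_true] at hx
            rcases List.mem_cons.mp hx with rfl | hx'
            · rfl
            · exact this.1 x hx'
          · rw [List.dropWhile_cons]
            simp only [hcd, if_true]
            exact this.2
        · rintro ⟨h1, h2⟩
          have h1' : ∀ x ∈ t'.takeWhile (fun c => pvIsD c), x = '0' := by
            intro x hx
            apply h1
            rw [List.takeWhile_cons]
            simp [hcd, hx]
          have h2' : ∃ x ∈ t'.dropWhile (fun c => pvIsD c), pvIsD x = true ∧ x ≠ '0' := by
            rw [List.dropWhile_cons] at h2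
            simpa [hcd] using h2
          obtain ⟨g1, g2⟩ := ih.mpr ⟨h1', h2'⟩
          refine ⟨by simpa using g1, ?_⟩
          rw [List.take_succ_cons, List.any_cons]
          simp [hcd, g2]
      · have hp : (pvIsD c && c != '0') = true := by simp [hcd, hc0]
        rw [hp]
        simp only [cond_true]
        constructor
        · rintro ⟨_, h2⟩
          simp at h2
        · rintro ⟨h1, _⟩
          exfalso
          apply hc0
          apply h1
          rw [List.takeWhile_cons]
          simp [hcd]
    · have hcd' : pvIsD c = false := by simpa using hcd
      have hp : (pvIsD c && c != '0') = false := by simp [hcd']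
      rw [hp]
      simp only [cond_false]
      constructor
      · rintro ⟨h1, _⟩
        have hex : ∃ x ∈ t', (pvIsD x && x != '0') = true := by
          rw [← pv_findIdx_lt]
          simpa using h1
        obtain ⟨x, hx, hxp⟩ := hex
        have hxd : pvIsD x = true := by
          revert hxp; cases pvIsD x <;> simp
        have hxne : x ≠ '0' := by
          revert hxp; simp only [Bool.and_eq_true, bne_iff_ne]; intro h; exact h.2
        refine ⟨?_, ?_⟩
        · intro y hy
          rw [List.takeWhile_cons] at hy
          simp [hcd'] at hy
        · rw [List.dropWhile_cons]
          simp only [hcd', Bool.false_eq_true, if_false]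
          exact ⟨x, by simp [hx], hxd, hxne⟩
      · rintro ⟨_, h2⟩
        rw [List.dropWhile_cons] at h2
        simp only [hcd', Bool.false_eq_true, if_false] at h2
        obtain ⟨x, hx, hxd, hxne⟩ := h2
        have hxt : x ∈ t' := by
          rcases List.mem_cons.mp hx with rfl | hx'
          · rw [hxd] at hcd'; exact absurd hcd' (by simp)
          · exact hx'
        have hk : t'.findIdx (fun c => pvIsD c && c != '0') < t'.length := by
          rw [pv_findIdx_lt]
          exact ⟨x, hxt, by simp [hxd, hxne]⟩
        refine ⟨by simpa using hk, ?_⟩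
        rw [List.take_succ_cons, List.any_cons]
        simp [hcd']

-- skipping the trailing non-digits
theorem pv_phase1 (r : List Char) :
    (r.findIdx (fun c => pvIsD c && c != '0') < r.length ∧
     (((r.take (r.findIdx (fun c => pvIsD c && c != '0'))).drop (r.findIdx pvIsD)).any (fun c => ! pvIsD c)) = true) ↔
    ((r.dropWhile (fun c => ! pvIsD c)).takeWhile (fun c => pvIsD c) ≠ [] ∧
     (∀ c ∈ (r.dropWhile (fun c => ! pvIsD c)).takeWhile (fun c => pvIsD c), c = '0') ∧
     (∃ c ∈ (r.dropWhile (fun c => ! pvIsD c)).dropWhile (fun c => pvIsD c), pvIsD c = true ∧ c ≠ '0')) := by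
  induction r with
  | nil => simp
  | cons c t ih =>
    by_cases hcd : pvIsD c = true
    · have hi0 : (c :: t).findIdx pvIsD = 0 := by
        rw [List.findIdx_cons, hcd]
        rfl
      have hdw : (c :: t).dropWhile (fun c => ! pvIsD c) = c :: t := by
        simp [List.dropWhile_cons, hcd]
      rw [hi0, hdw, List.findIdx_cons]
      by_cases hc0 : c = '0'
      · subst hc0
        have hp : (pvIsD '0' && '0' != '0') = false := by decide
        rw [hp]
        simp only [cond_false]
        have hlhs : ((('0' :: t).take (t.findIdx (fun c => pvIsD c && c != '0') + 1)).drop 0).any (fun c => ! pvIsD c)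
            = (t.take (t.findIdx (fun c => pvIsD c && c != '0'))).any (fun c => ! pvIsD c) := by
          rw [List.take_succ_cons, List.drop_zero, List.any_cons]
          simp [hcd]
        constructor
        · rintro ⟨h1, h2⟩
          rw [hlhs] at h2
          obtain ⟨g1, g2⟩ := pv_phase2 t |>.mp ⟨by simpa using h1, h2⟩
          refine ⟨by simp [List.takeWhile_cons, hcd], ?_, ?_⟩
          · intro x hx
            rw [List.takeWhile_cons] at hx
            simp only [hcd, if_true] at hx
            rcases List.mem_cons.mp hx with rfl | hx'
            · rfl
            · exact g1 x hx'
          · rw [List.dropWhile_cons]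
            simp only [hcd, if_true]
            exact g2
        · rintro ⟨_, h1, h2⟩
          have h1' : ∀ x ∈ t.takeWhile (fun c => pvIsD c), x = '0' := by
            intro x hx
            apply h1
            rw [List.takeWhile_cons]
            simp [hcd, hx]
          have h2' : ∃ x ∈ t.dropWhile (fun c => pvIsD c), pvIsD x = true ∧ x ≠ '0' := by
            rw [List.dropWhile_cons] at h2
            simpa [hcd] using h2
          obtain ⟨g1, g2⟩ := pv_phase2 t |>.mpr ⟨h1', h2'⟩
          exact ⟨by simpa using g1, by rw [hlhs]; exact g2⟩
      · have hp : (pvIsD c && c != '0') = true := by simp [hcd, hc0]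
        rw [hp]
        simp only [cond_true]
        constructor
        · rintro ⟨_, h2⟩
          simp at h2
        · rintro ⟨_, h1, _⟩
          exfalso
          apply hc0
          apply h1
          rw [List.takeWhile_cons]
          simp [hcd]
    · have hcd' : pvIsD c = false := by simpa using hcd
      have hp : (pvIsD c && c != '0') = false := by simp [hcd']
      have hdw : (c :: t).dropWhile (fun c => ! pvIsD c) = t.dropWhile (fun c => ! pvIsD c) := by
        simp [List.dropWhile_cons, hcd']
      rw [List.findIdx_cons, List.findIdx_cons, hp, hcd', hdw]
      simp only [cond_false]
      rw [List.take_succ_cons, List.drop_succ_cons]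
      constructor
      · rintro ⟨h1, h2⟩
        exact ih.mp ⟨by simpa using h1, h2⟩
      · intro h
        obtain ⟨g1, g2⟩ := ih.mpr h
        exact ⟨by simpa using g1, g2⟩

-- D_SearchLength, read through the reversed character list: the last maximal digit
-- run is nonempty and all zeros, and a nonzero digit occurs beyond it
theorem D_iff (s : String) : D_SearchLength s ↔
    (((s.toList.reverse).dropWhile (fun c => ! pvIsD c)).takeWhile (fun c => pvIsD c) ≠ [] ∧
     (∀ c ∈ ((s.toList.reverse).dropWhile (fun c => ! pvIsD c)).takeWhile (fun c => pvIsD c), c = '0') ∧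
     (∃ c ∈ ((s.toList.reverse).dropWhile (fun c => ! pvIsD c)).dropWhile (fun c => pvIsD c), pvIsD c = true ∧ c ≠ '0')) := by
  unfold D_SearchLength
  exact pv_phase1 s.toList.reverse

theorem SearchLength_unchanged (s : String) (hD : ¬ D_SearchLength s) :
    SearchLength s = SearchLength_alt s := by
  rcases pvA_decomp s with hA | hA
  · set r2 := (s.toList.reverse).dropWhile (fun c => ! pvIsD c) with hr2
    set run := r2.takeWhile (fun c => pvIsD c) with hrun
    set rest := r2.dropWhile (fun c => pvIsD c) with hrest
    have hall : ∀ c ∈ run, pvIsD c = true := fun c hc => List.mem_takeWhile_imp hc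
    have hB : SearchLength_alt s = pvRunVal run := rfl
    rw [hA, hB]
    rcases hre : rest with _ | ⟨c, t⟩
    · rfl
    · have hcnd : pvIsD c = false := dropWhile_head_false (hrest ▸ hre)
      by_cases hV : pvRunVal run = 0
      · -- run is all zeros (or empty); ¬D_ forbids a nonzero digit in rest
        have hzrun : ∀ x ∈ run, x = '0' := (pvRunVal_facts run hall).2.mp hV
        have hrunne : run ≠ [] := by
          intro hnil
          cases hc2 : r2 with
          | nil =>
            have h1 : rest = [] := by rw [hrest, hc2]; rfl
            rw [hre] at h1
            simp at h1
          | cons a b =>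
            have ha : pvIsD a = true := by
              have hh := dropWhile_head_false (l := s.toList.reverse)
                (p := fun c => ! pvIsD c) (hr2.symm.trans hc2)
              simpa using hh
            have h2 : run = a :: b.takeWhile (fun c => pvIsD c) := by
              rw [hrun, hc2, List.takeWhile_cons, if_pos ha]
            rw [hnil] at h2
            simp at h2
        have hnoz : ∀ x ∈ rest, pvIsD x = true → x = '0' := by
          intro x hx hxd
          by_contra hxne
          exact hD ((D_iff s).mpr ⟨hrunne, hzrun, ⟨x, hx, hxd, hxne⟩⟩)
        rw [hre] at hnoz
        rw [hV]
        simp only [pvALoop, hcnd, Bool.false_eq_true, ne_eq,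
          not_true_eq_false, not_false_eq_true, if_neg]
        exact pvALoop_zeros t _ (fun x hx => hnoz x (List.mem_cons_of_mem _ hx))
      · simp [pvALoop, hcnd, hV]
  · -- the last digit run is empty: both sides are 0
    have hrun0 : ((s.toList.reverse).dropWhile (fun c => ! pvIsD c)).takeWhile (fun c => pvIsD c) = [] := by
      rw [hA]; rfl
    have hB : SearchLength_alt s = 0 := by
      unfold SearchLength_alt
      rw [hrun0]; rfl
    have hA' : SearchLength s = 0 := by
      unfold SearchLength
      rw [pvALoop_skip, hA]
      rfl
    rw [hA', hB]

-- ===== VERDICT (by name: the statement is the Claim_ definition above) =====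
theorem SearchLength_spec : Claim_unchanged_SearchLength := by
  intro s _ hD
  exact SearchLength_unchanged s hD

set_option maxRecDepth 100000 in
theorem SearchLength_changed : Claim_changed_SearchLength := by
  unfold Claim_changed_SearchLength; decide

theorem SearchLength_tight : Claim_exact_SearchLength := by
  intro s _ hD
  rcases (D_iff s).mp hD with ⟨hrunne, hzrun, hnz⟩
  rcases pvA_decomp s with hA | hA
  · set r2 := (s.toList.reverse).dropWhile (fun c => ! pvIsD c) with hr2
    set run := r2.takeWhile (fun c => pvIsD c) with hrun
    set rest := r2.dropWhile (fun c => pvIsD c) with hrest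
    have hall : ∀ c ∈ run, pvIsD c = true := fun c hc => List.mem_takeWhile_imp hc
    have hV : pvRunVal run = 0 := (pvRunVal_facts run hall).2.mpr hzrun
    have hB : SearchLength_alt s = 0 := by
      unfold SearchLength_alt; rw [← hr2, ← hrun]; exact hV
    have hApos : 0 < SearchLength s := by
      rw [hA, hV]
      exact pvALoop_pos _ _ hnz
    rw [hB]
    exact ne_of_gt hApos
  · exfalso
    apply hrunne
    simp [hA]
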